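-- pv_equiv track=rewrite | github.com/HL-Cledor/algoStudy | Problems/2805/ans_2805_JHP.py | div_tree
-- ===== SOURCE A (Python) =====
-- def div_tree(target, array_len):
--     left = 0
--     right = max(array_len)
--     max_len = 0
--
--     while right - left > 1:
--         total_len = 0
--         mid = (left+right)//2
--
--         for val in array_len:
--             if val > mid: # val % target으로 했을 경우,
--                 total_len += val - mid
--
--         if total_len > target:
--             left = mid
--             max_len = mid   # 남은 길이가 target보다 큰 경우에도 최대 길이는 유효함. (이 부분이 없어도 예제는 모두 정답이지만, 반례가 있음.)
--         elif total_len < target: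
--             right = mid
--         else:
--             max_len = mid   # 딱 맞게 떨어지는 경우,
--             break
--     return max_len
-- ===== SOURCE B (Python) =====
-- def div_tree(target, array_len):
--     # sort once + prefix sums; each binary-search step uses an inner binary search
--     arr = sorted(array_len)
--     n = len(arr)
--     prefix = [0]
--     s = 0
--     for v in arr:
--         s += v
--         prefix.append(s)
--     left = 0
--     right = arr[-1]
--     max_len = 0
--     while right - left > 1:
--         mid = (left + right) // 2
--         lo, hi = 0, n
--         while lo < hi:
--             m = (lo + hi) // 2
--             if arr[m] > mid:
--                 hi = m
--             else:
--                 lo = m + 1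
--         total_len = s - prefix[lo] - (n - lo) * mid
--         if total_len > target:
--             left = mid
--             max_len = mid
--         elif total_len < target:
--             right = mid
--         else:
--             max_len = mid
--             break
--     return max_len
-- ===== Notes on version B (the rewrite author's own statement) =====
-- stated objective: alternative
-- what changed: B sorts the lengths once and builds prefix sums, then each binary-search step evaluates the remaining total via an inner binary search over the sorted list instead of A's scan over the whole list.
-- outside the precondition, e.g. on div_tree(7, []): A raises ValueError, B raises IndexError
import Mathlib
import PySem

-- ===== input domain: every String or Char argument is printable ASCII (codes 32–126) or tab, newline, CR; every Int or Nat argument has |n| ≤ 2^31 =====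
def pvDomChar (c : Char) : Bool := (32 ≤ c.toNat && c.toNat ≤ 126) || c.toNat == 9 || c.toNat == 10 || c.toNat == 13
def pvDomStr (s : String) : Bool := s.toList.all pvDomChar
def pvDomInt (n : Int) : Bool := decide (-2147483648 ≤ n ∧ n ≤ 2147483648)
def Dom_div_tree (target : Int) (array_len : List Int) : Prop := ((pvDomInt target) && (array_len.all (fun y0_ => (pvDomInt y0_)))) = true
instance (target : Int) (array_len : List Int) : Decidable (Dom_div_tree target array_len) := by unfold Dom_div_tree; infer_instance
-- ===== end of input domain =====

-- B restructures A: sort once + prefix sums, then each binary-search step evaluates the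
-- remaining total by an inner binary search instead of A's scan over the whole list.

-- ===== PORT A =====
-- the while-loop; fuel (right-left).toNat is enough: right-left strictly decreases each iteration
def divTreeLoopA (target : Int) (array_len : List Int) : Nat → Int → Int → Int → Int
  | 0, _, _, max_len => max_len
  | fuel+1, left, right, max_len =>
    if right - left > 1 then
      let mid := PySem.Int.floordiv (left + right) 2
      let total_len := array_len.foldl (fun acc val => if val > mid then acc + (val - mid) else acc) 0
      if total_len > target then divTreeLoopA target array_len fuel mid right mid
      else if total_len < target then divTreeLoopA target array_len fuel left mid max_len
      else mid
    else max_len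

def div_tree (target : Int) (array_len : List Int) : Int :=
  let left : Int := 0
  -- max(array_len): raises on [], excluded by Pre_; .getD 0 is the total form
  let right : Int := (PySem.List.max? array_len (fun x => x)).getD 0
  divTreeLoopA target array_len (right - left).toNat left right 0

-- ===== PORT B =====
-- inner while lo < hi: first index with arr[m] > mid; fuel arr.length suffices
def bsearchGT (arr : List Int) (mid : Int) : Nat → Int → Int → Int
  | 0, lo, _ => lo
  | fuel+1, lo, hi =>
    if lo < hi then
      let m := PySem.Int.floordiv (lo + hi) 2
      if PySem.List.pyGetD arr m 0 > mid then bsearchGT arr mid fuel lo m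
      else bsearchGT arr mid fuel (m + 1) hi
    else lo

def divTreeLoopB (target : Int) (arr : List Int) (n s : Int) (pfx : List Int) : Nat → Int → Int → Int → Int
  | 0, _, _, max_len => max_len
  | fuel+1, left, right, max_len =>
    if right - left > 1 then
      let mid := PySem.Int.floordiv (left + right) 2
      let lo := bsearchGT arr mid arr.length 0 n
      let total_len := s - PySem.List.pyGetD pfx lo 0 - (n - lo) * mid
      if total_len > target then divTreeLoopB target arr n s pfx fuel mid right mid
      else if total_len < target then divTreeLoopB target arr n s pfx fuel left mid max_len
      else mid
    else max_len

def div_tree_alt (target : Int) (array_len : List Int) : Int :=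
  let arr := PySem.List.sorted array_len (fun x => x) false
  let n : Int := arr.length
  let p := arr.foldl (fun st v => (st.1 + v, st.2 ++ [st.1 + v])) ((0 : Int), [(0 : Int)])
  -- arr[-1]: raises on [], excluded by Pre_; pyGetD is the total form
  let right := PySem.List.pyGetD arr (-1) 0
  divTreeLoopB target arr n p.1 p.2 (right - 0).toNat 0 right 0

-- ===== PRECONDITION & SPEC =====
-- Pre_ excludes only the empty list, on which A's max(array_len) raises ValueError (B's arr[-1] likewise)
def Pre_div_tree (target : Int) (array_len : List Int) : Prop := array_len ≠ []
instance (target : Int) (array_len : List Int) : Decidable (Pre_div_tree target array_len) := by unfold Pre_div_tree; infer_instance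
def pvWitness_div_tree : Int × List Int := (6, [1, 2, 3])

def Spec_div_tree (target : Int) (array_len : List Int) (out : Int) : Prop := out = div_tree_alt target array_len
instance (target : Int) (array_len : List Int) (out : Int) : Decidable (Spec_div_tree target array_len out) := by unfold Spec_div_tree; infer_instance

-- ===== CLAIM (what is proved, stated in full; the proofs are below) =====
def Claim_equal_div_tree : Prop := ∀ (target : Int) (array_len : List Int), Dom_div_tree target array_len → Pre_div_tree target array_len → Spec_div_tree target array_len (div_tree target array_len)

-- ===== LEMMAS AND PROOFS =====

-- A's inner for-loop is the sum of (v - mid) over the elements > mid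
theorem foldlA_eq_sum (l : List Int) (mid a : Int) :
    l.foldl (fun acc val => if val > mid then acc + (val - mid) else acc) a
      = a + ((l.filter (fun v => decide (mid < v))).map (fun v => v - mid)).sum := by
  induction l generalizing a with
  | nil => simp
  | cons v t ih =>
    simp only [List.foldl_cons]
    by_cases h : mid < v
    · have hf : (v :: t).filter (fun v => decide (mid < v)) = v :: t.filter (fun v => decide (mid < v)) :=
        List.filter_cons_of_pos (decide_eq_true h)
      rw [if_pos h, ih, hf, List.map_cons, List.sum_cons]
      ring
    · have hf : (v :: t).filter (fun v => decide (mid < v)) = t.filter (fun v => decide (mid < v)) :=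
        List.filter_cons_of_neg (by simpa using h)
      rw [if_neg h, ih, hf]

theorem sum_map_sub (l : List Int) (mid : Int) :
    ((l.map (fun v => v - mid)).sum : Int) = l.sum - l.length * mid := by
  induction l with
  | nil => simp
  | cons v t ih =>
    simp only [List.map_cons, List.sum_cons, List.length_cons, ih]
    push_cast
    ring

-- on a sorted list the elements > mid sum to (total − prefix at countP(≤mid)) − count·mid
theorem sorted_split_sum (l : List Int) (mid : Int) (h : l.Pairwise (· ≤ ·)) :
    ((l.filter (fun v => decide (mid < v))).map (fun v => v - mid)).sum
      = l.sum - (l.take (l.countP (fun v => decide (v ≤ mid)))).sum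
          - ((l.length : Int) - (l.countP (fun v => decide (v ≤ mid)) : Int)) * mid := by
  induction l with
  | nil => simp
  | cons v t ih =>
    rcases List.pairwise_cons.mp h with ⟨hhead, htail⟩
    have hfp : (v :: t).filter (fun v => decide (mid < v)) = if mid < v then v :: t.filter (fun v => decide (mid < v)) else t.filter (fun v => decide (mid < v)) := by
      by_cases h1 : mid < v
      · rw [if_pos h1]; exact List.filter_cons_of_pos (decide_eq_true h1)
      · rw [if_neg h1]; exact List.filter_cons_of_neg (by simpa using h1)
    have hcp : (v :: t).countP (fun v => decide (v ≤ mid)) = if v ≤ mid then t.countP (fun v => decide (v ≤ mid)) + 1 else t.countP (fun v => decide (v ≤ mid)) := by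
      by_cases h1 : v ≤ mid
      · rw [if_pos h1]; exact List.countP_cons_of_pos (decide_eq_true h1)
      · rw [if_neg h1]; exact List.countP_cons_of_neg (by simpa using h1)
    by_cases hv : v ≤ mid
    · have h1 : ¬ (mid < v) := by omega
      have hc : t.countP (fun v => decide (v ≤ mid)) ≤ t.length := List.countP_le_length
      rw [hfp, if_neg h1, hcp, if_pos hv, ih htail, List.take_succ_cons, List.sum_cons,
        List.length_cons, List.sum_cons]
      push_cast
      ring
    · have h1 : mid < v := by omega
      have hall : ∀ x ∈ t, mid < x := fun x hx => lt_of_lt_of_le h1 (hhead x hx)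
      have hfilter : t.filter (fun v => decide (mid < v)) = t :=
        List.filter_eq_self.mpr (fun x hx => by simpa using hall x hx)
      have hcount : t.countP (fun v => decide (v ≤ mid)) = 0 :=
        List.countP_eq_zero.mpr (fun x hx => by have := hall x hx; simpa using (by omega : ¬ x ≤ mid))
      rw [hfp, if_pos h1, hcp, if_neg hv, hfilter, hcount, List.map_cons, List.sum_cons,
        sum_map_sub, List.take_zero, List.sum_nil, List.sum_cons, List.length_cons]
      push_cast
      ring

-- in a sorted list, element i is ≤ mid iff i < countP(≤ mid)
theorem sorted_count_char (l : List Int) (mid : Int) (h : l.Pairwise (· ≤ ·)) :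
    ∀ (i : Nat) (hi : i < l.length), (l[i] ≤ mid ↔ i < l.countP (fun v => decide (v ≤ mid))) := by
  induction l with
  | nil => intro i hi; simp at hi
  | cons v t ih =>
    rcases List.pairwise_cons.mp h with ⟨hhead, htail⟩
    intro i hi
    cases i with
    | zero =>
      simp only [List.getElem_cons_zero]
      constructor
      · intro hv
        have := List.countP_cons_of_pos (l := t) (p := fun v => decide (v ≤ mid)) (decide_eq_true hv)
        omega
      · intro hpos
        by_contra hv
        have hcount : t.countP (fun v => decide (v ≤ mid)) = 0 :=
          List.countP_eq_zero.mpr (fun x hx => by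
            have := hhead x hx; simpa using (by omega : ¬ x ≤ mid))
        have := List.countP_cons_of_neg (l := t) (p := fun v => decide (v ≤ mid)) (by simpa using hv)
        omega
    | succ j =>
      simp only [List.getElem_cons_succ]
      have hj : j < t.length := by simpa using hi
      by_cases hv : v ≤ mid
      · simp [hv, ih htail j hj]
      · have hcount : t.countP (fun v => decide (v ≤ mid)) = 0 :=
          List.countP_eq_zero.mpr (fun x hx => by simp; have := hhead x hx; omega)
        simp [hcount, hv]
        have := ih htail j hj
        omega

-- B's hand-written binary search returns countP(≤ mid) on a sorted list
theorem bsearchGT_spec (l : List Int) (mid : Int) (h : l.Pairwise (· ≤ ·)) :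
    ∀ (fuel : Nat) (lo hi : Int), 0 ≤ lo → lo ≤ (l.countP (fun v => decide (v ≤ mid)) : Int) →
      (l.countP (fun v => decide (v ≤ mid)) : Int) ≤ hi → hi ≤ l.length →
      (hi - lo).toNat ≤ fuel →
      bsearchGT l mid fuel lo hi = (l.countP (fun v => decide (v ≤ mid)) : Int) := by
  set c : Int := (l.countP (fun v => decide (v ≤ mid)) : Int) with hc
  intro fuel
  induction fuel with
  | zero => intro lo hi h0 h1 h2 h3 h4; simp [bsearchGT]; omega
  | succ fuel ih =>
    intro lo hi h0 h1 h2 h3 h4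
    by_cases hlt : lo < hi
    · have hm1 : lo ≤ PySem.Int.floordiv (lo + hi) 2 ∧ PySem.Int.floordiv (lo + hi) 2 ≤ hi :=
        PySem.Int.floordiv_two_mid_bounds (le_of_lt hlt)
      have hm2 : PySem.Int.floordiv (lo + hi) 2 < hi := by
        rw [PySem.Int.floordiv_lt_iff_lt_mul (by omega)]; omega
      set m := PySem.Int.floordiv (lo + hi) 2 with hmdef
      have hm0 : 0 ≤ m := le_trans h0 hm1.1
      have hmlen : m < l.length := by omega
      have hget : PySem.List.pyGetD l m 0 = l[m.toNat] :=
        PySem.List.pyGetD_eq_getElem l 0 hm0 hmlen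
      have hchar := sorted_count_char l mid h m.toNat (by omega)
      by_cases hb : PySem.List.pyGetD l m 0 > mid
      · have hcm : c ≤ m := by
          rw [hget] at hb
          have : ¬ (m.toNat < l.countP (fun v => decide (v ≤ mid))) := fun hcontra => by
            have := hchar.mpr hcontra; omega
          omega
        simp only [bsearchGT, if_pos hlt, ← hmdef, if_pos hb]
        exact ih lo m h0 h1 hcm (by omega) (by omega)
      · have hcm : m + 1 ≤ c := by
          rw [hget] at hb
          have : m.toNat < l.countP (fun v => decide (v ≤ mid)) := hchar.mp (by omega)
          omega
        simp only [bsearchGT, if_pos hlt, ← hmdef, if_neg hb]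
        exact ih (m + 1) hi (by omega) hcm h2 h3 (by omega)
    · simp [bsearchGT, hlt]; omega

-- the running prefix sums B builds
def partialSums (s0 : Int) : List Int → List Int
  | [] => []
  | v :: t => (s0 + v) :: partialSums (s0 + v) t

theorem foldl_prefix (l : List Int) : ∀ (s0 : Int) (acc : List Int),
    l.foldl (fun st v => (st.1 + v, st.2 ++ [st.1 + v])) (s0, acc)
      = (s0 + l.sum, acc ++ partialSums s0 l) := by
  induction l with
  | nil => intro s0 acc; simp [partialSums]
  | cons v t ih =>
    intro s0 acc
    simp only [List.foldl, partialSums, ih, List.sum_cons, Prod.mk.injEq]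
    exact ⟨by ring, by simp⟩

theorem partialSums_getD (l : List Int) : ∀ (s0 : Int) (k : Nat), k ≤ l.length →
    (s0 :: partialSums s0 l).getD k 0 = s0 + (l.take k).sum := by
  induction l with
  | nil =>
    intro s0 k hk
    have : k = 0 := by simpa using hk
    subst this; simp
  | cons v t ih =>
    intro s0 k hk
    cases k with
    | zero => simp
    | succ j =>
      have : (s0 :: partialSums s0 (v :: t)).getD (j+1) 0
           = ((s0 + v) :: partialSums (s0 + v) t).getD j 0 := by simp [partialSums]
      rw [this, ih (s0 + v) j (by simpa using hk)]
      simp [List.take_succ_cons]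
      ring

-- the two per-step totals coincide
theorem total_eq (array_len : List Int) (mid : Int) :
    array_len.foldl (fun acc val => if val > mid then acc + (val - mid) else acc) 0
      = (PySem.List.sorted array_len (fun x => x) false).sum
        - PySem.List.pyGetD
            ((0 : Int) :: partialSums 0 (PySem.List.sorted array_len (fun x => x) false))
            (bsearchGT (PySem.List.sorted array_len (fun x => x) false) mid
              (PySem.List.sorted array_len (fun x => x) false).length 0
              ((PySem.List.sorted array_len (fun x => x) false).length : Int)) 0
        - (((PySem.List.sorted array_len (fun x => x) false).length : Int)
            - bsearchGT (PySem.List.sorted array_len (fun x => x) false) mid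
                (PySem.List.sorted array_len (fun x => x) false).length 0
                ((PySem.List.sorted array_len (fun x => x) false).length : Int)) * mid := by
  set arr := PySem.List.sorted array_len (fun x => x) false with harr
  have hpair : arr.Pairwise (· ≤ ·) := by
    have := PySem.List.sorted_pairwise array_len (fun x => x)
    simpa [harr] using this
  have hperm : arr.Perm array_len := PySem.List.sorted_perm array_len (fun x => x) false
  have hbs : bsearchGT arr mid arr.length 0 (arr.length : Int)
      = (arr.countP (fun v => decide (v ≤ mid)) : Int) := by
    apply bsearchGT_spec arr mid hpair arr.length 0 (arr.length : Int) le_rfl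
    · exact_mod_cast Nat.zero_le _
    · exact_mod_cast List.countP_le_length
    · exact le_rfl
    · omega
  rw [hbs, foldlA_eq_sum]
  have hsum : ((array_len.filter (fun v => decide (mid < v))).map (fun v => v - mid)).sum
      = ((arr.filter (fun v => decide (mid < v))).map (fun v => v - mid)).sum :=
    (List.Perm.sum_eq (List.Perm.map _ (List.Perm.filter _ hperm))).symm
  rw [zero_add, hsum, sorted_split_sum arr mid hpair]
  have hgd : PySem.List.pyGetD ((0 : Int) :: partialSums 0 arr)
      ((arr.countP (fun v => decide (v ≤ mid)) : Int)) 0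
      = (arr.take (arr.countP (fun v => decide (v ≤ mid)))).sum := by
    rw [PySem.List.pyGetD_natCast]
    rw [partialSums_getD arr 0 _ List.countP_le_length]
    ring
  rw [hgd]

-- given equal per-step totals, the two while-loops coincide
theorem loops_eq (target : Int) (array_len arr : List Int) (n s : Int) (pfx : List Int)
    (htot : ∀ mid : Int,
      array_len.foldl (fun acc val => if val > mid then acc + (val - mid) else acc) 0
        = s - PySem.List.pyGetD pfx (bsearchGT arr mid arr.length 0 n) 0
            - (n - bsearchGT arr mid arr.length 0 n) * mid) :
    ∀ (fuel : Nat) (left right max_len : Int),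
      divTreeLoopA target array_len fuel left right max_len
        = divTreeLoopB target arr n s pfx fuel left right max_len := by
  intro fuel
  induction fuel with
  | zero => intro left right max_len; rfl
  | succ fuel ih =>
    intro left right max_len
    simp only [divTreeLoopA, divTreeLoopB, htot, ih]

-- the last element of the sorted list is max(array_len)
theorem max_eq_last (array_len : List Int) (hne : array_len ≠ []) :
    (PySem.List.max? array_len (fun x => x)).getD 0
      = PySem.List.pyGetD (PySem.List.sorted array_len (fun x => x) false) (-1) 0 := by
  set arr := PySem.List.sorted array_len (fun x => x) false with harr
  have hane : arr ≠ [] := by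
    intro h; exact hne ((PySem.List.sorted_eq_nil_iff array_len (fun x => x) false).mp (harr ▸ h))
  rw [PySem.List.pyGetD_neg_one arr 0 hane]
  obtain ⟨M, hM⟩ : ∃ M, PySem.List.max? array_len (fun x => x) = some M := by
    cases hmx : PySem.List.max? array_len (fun x => x) with
    | none => exact absurd ((PySem.List.max?_eq_none_iff array_len (fun x => x)).mp hmx) hne
    | some M => exact ⟨M, rfl⟩
  rw [hM]
  simp only [Option.getD_some]
  have hMmem : M ∈ array_len := PySem.List.max?_mem hM
  have hmax : ∀ y ∈ array_len, y ≤ M := PySem.List.max?_isMax hM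
  have hlast_mem : arr.getLast hane ∈ array_len :=
    (PySem.List.mem_sorted array_len (fun x => x) false _).mp (List.getLast_mem hane)
  have h1 : arr.getLast hane ≤ M := hmax _ hlast_mem
  have hpair : arr.Pairwise (· ≤ ·) := by
    have := PySem.List.sorted_pairwise array_len (fun x => x)
    simpa [harr] using this
  have hMarr : M ∈ arr := (PySem.List.mem_sorted array_len (fun x => x) false M).mpr hMmem
  obtain ⟨i, hi, hieq⟩ := List.mem_iff_getElem.mp hMarr
  have h2 : M ≤ arr.getLast hane := by
    rw [List.getLast_eq_getElem]
    rcases Nat.lt_or_ge i (arr.length - 1) with hlt | hge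
    · exact hieq ▸ List.pairwise_iff_getElem.mp hpair i (arr.length - 1) hi (by omega) hlt
    · have hidx : i = arr.length - 1 := by omega
      subst hidx
      exact le_of_eq hieq.symm
  omega

-- ===== VERDICT (by name: the statement is the Claim_ definition above) =====
theorem div_tree_spec : Claim_equal_div_tree := by
  intro target array_len _hdom hpre
  unfold Spec_div_tree div_tree div_tree_alt
  simp only [foldl_prefix, zero_add, List.singleton_append, sub_zero]
  rw [← max_eq_last array_len hpre]
  exact loops_eq target array_len _ _ _ _ (fun mid => total_eq array_len mid) _ _ _ _
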